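-- pv_equiv track=rewrite | github.com/YousefGh/Bioinformatics-I | motifsFinder.py | patternToDnaDistance
-- ===== SOURCE A (Python) =====
-- def hammingDistance(pattern_1, pattern_2):
--     '''
--     hamming distance is the difference between two patterns based on letters
--     1 letter mismatch will add 1 to the hamming distance
--
--     :param pattern_1: pattern in a genome
--     :param pattern_2: pattern in a genome
--     :return: integer representing hamming distance
--     '''
--     distance = 0
--     for i in range(len(pattern_1)):
--         if pattern_1[i] != pattern_2[i]:
--             distance += 1
--     return distance
--
-- def patternToDnaDistance(dna, pattern):
--     '''
--     calculates the total hamming distance between a pattern (k-mer) and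
--     each string in the DNA
--
--     :param dna: collection of sequences of DNA
--     :param pattern: k-mer
--     :return: total hamming distance between pattern and all dna strings
--     '''
--     distance = 0
--     k = len(pattern)
--     for sequence in dna:
--         localDistance = float('inf')
--         for i in range(len(sequence) - k + 1):
--             p = sequence[i: i + k]
--             newDistance = hammingDistance(pattern, p)
--             if newDistance < localDistance:
--                 localDistance = newDistance
--         distance += localDistance
--     return distance
-- ===== SOURCE B (Python) =====
-- def patternToDnaDistance(dna, pattern):
--     # Column-major: for each pattern position j, add its mismatch contribution to
--     # every window's running count at once, then take the minimum per sequence.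
--     total = 0
--     k = len(pattern)
--     for seq in dna:
--         mis = [0] * (len(seq) - k + 1)
--         for j, c in enumerate(pattern):
--             mis = [m + (seq[i + j] != c) for i, m in enumerate(mis)]
--         total += min(mis)
--     return total
-- ===== Notes on version B (the rewrite author's own statement) =====
-- stated objective: alternative
-- what changed: Replaces the window-by-window hamming-distance scan with a column-major pass: one running mismatch array over all windows is updated per pattern position, and the per-sequence minimum is taken from that array instead of by a running strict-min with an inf sentinel.
-- outside the precondition, e.g. on patternToDnaDistance(['A'], 'AC'): A returns inf, B raises ValueError
import Mathlib
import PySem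

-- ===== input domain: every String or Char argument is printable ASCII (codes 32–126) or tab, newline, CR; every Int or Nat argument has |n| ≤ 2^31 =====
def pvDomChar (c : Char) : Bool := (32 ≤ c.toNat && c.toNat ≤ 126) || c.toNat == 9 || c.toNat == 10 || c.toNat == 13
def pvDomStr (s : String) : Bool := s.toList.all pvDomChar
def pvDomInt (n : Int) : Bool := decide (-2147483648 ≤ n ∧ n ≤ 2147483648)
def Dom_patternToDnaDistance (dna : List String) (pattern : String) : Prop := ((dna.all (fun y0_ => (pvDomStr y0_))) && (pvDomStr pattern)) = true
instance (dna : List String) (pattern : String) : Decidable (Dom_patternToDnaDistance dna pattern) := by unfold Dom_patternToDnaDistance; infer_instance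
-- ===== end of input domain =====

-- B replaces A's window-by-window hamming scan with a column-major mismatch-array pass per sequence (alternative structure, same cost); equal return values whenever every sequence is at least as long as the pattern.


-- ===== PORT A =====
def hammingDistance (p1 p2 : String) : Int :=
  (PySem.List.pyRange 0 (PySem.Str.len p1) 1).foldl
    (fun d i => if PySem.Str.pyGet? p1 i ≠ PySem.Str.pyGet? p2 i then d + 1 else d) 0

def patternToDnaDistance (dna : List String) (pattern : String) : Int :=
  let k := PySem.Str.len pattern
  dna.foldl (fun distance sequence =>
    let localDistance : Option Int :=   -- 'float("inf")' modelled as 'none'; never the final value inside Pre_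
      (PySem.List.pyRange 0 (PySem.Str.len sequence - k + 1) 1).foldl
        (fun ld i =>
          let p := PySem.Str.slice sequence (some i) (some (i + k))
          let newDistance := hammingDistance pattern p
          match ld with
          | none => some newDistance
          | some d => if newDistance < d then some newDistance else ld) none
    distance + localDistance.getD 0) 0

-- ===== PORT B =====
def patternToDnaDistance_alt (dna : List String) (pattern : String) : Int :=
  let k := PySem.Str.len pattern
  dna.foldl (fun total seq =>
    let mis0 : List Int := PySem.List.pyRepeat [0] (PySem.Str.len seq - k + 1)
    let mis := (PySem.List.enumerate pattern.toList).foldl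
      (fun mis jc =>
        (PySem.List.enumerate mis).map (fun im =>
          im.2 + (if PySem.Str.pyGet? seq (im.1 + jc.1) ≠ some jc.2 then 1 else 0)))
      mis0
    total + ((PySem.List.min? mis (fun x => x)).getD 0)) 0   -- 'min(mis)'; getD unreachable inside Pre_

-- ===== PRECONDITION & SPEC =====
-- Pre_ excludes dna containing a sequence shorter than the pattern: there A adds float('inf')
-- (a float, not an int) while B's min() over an empty window list raises ValueError.
def Pre_patternToDnaDistance (dna : List String) (pattern : String) : Prop :=
  ∀ s ∈ dna, PySem.Str.len pattern ≤ PySem.Str.len s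
instance (dna : List String) (pattern : String) : Decidable (Pre_patternToDnaDistance dna pattern) := by unfold Pre_patternToDnaDistance; infer_instance
def pvWitness_patternToDnaDistance : List String × String := (["ACGT", "GAT"], "AC")
def Spec_patternToDnaDistance (dna : List String) (pattern : String) (out : Int) : Prop := out = patternToDnaDistance_alt dna pattern
instance (dna : List String) (pattern : String) (out : Int) : Decidable (Spec_patternToDnaDistance dna pattern out) := by unfold Spec_patternToDnaDistance; infer_instance

-- ===== CLAIM (what is proved, stated in full; the proofs are below) =====
def Claim_equal_patternToDnaDistance : Prop := ∀ (dna : List String) (pattern : String), Dom_patternToDnaDistance dna pattern → Pre_patternToDnaDistance dna pattern → Spec_patternToDnaDistance dna pattern (patternToDnaDistance dna pattern)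

-- ===== LEMMAS AND PROOFS =====

-- mismatch count of pattern-suffix P against seq read from absolute index i
def pvD2 (seq : String) : List Char → Int → Int
  | [], _ => 0
  | c :: P, i => (if PySem.Str.pyGet? seq i ≠ some c then 1 else 0) + pvD2 seq P (i + 1)

-- A's running strict-min step on Option Int
def pvMStep (ld : Option Int) (nd : Int) : Option Int :=
  match ld with
  | none => some nd
  | some d => if nd < d then some nd else ld

lemma pvEnumMap (n : Nat) (g : Nat → Int) (h : Int → Int) :
    (PySem.List.enumerate ((List.range n).map g)).map (fun im => im.2 + h im.1)
      = (List.range n).map (fun i => g i + h (i : Int)) := by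
  apply List.ext_getElem
  · simp [PySem.List.length_enumerate]
  · intro k h1 h2
    simp [PySem.List.length_enumerate] at h1
    simp [PySem.List.getElem_enumerate]

lemma pvBFold (seq : String) (P : List Char) (s : Int) (n : Nat) (g : Nat → Int) :
    (PySem.List.enumerate P s).foldl
      (fun mis jc =>
        (PySem.List.enumerate mis).map (fun im =>
          im.2 + (if PySem.Str.pyGet? seq (im.1 + jc.1) ≠ some jc.2 then 1 else 0)))
      ((List.range n).map g)
    = (List.range n).map (fun i => g i + pvD2 seq P ((i : Int) + s)) := by
  induction P generalizing s g with
  | nil =>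
    simp [PySem.List.enumerate, pvD2]
  | cons c P ih =>
    rw [PySem.List.enumerate_cons, List.foldl_cons]
    rw [pvEnumMap n g (fun x => if PySem.Str.pyGet? seq (x + s) ≠ some c then 1 else 0)]
    rw [ih (s+1) (fun i => g i + (if PySem.Str.pyGet? seq ((i : Int) + s) ≠ some c then 1 else 0))]
    apply List.map_congr_left
    intro i _
    simp only [pvD2]
    ring_nf

lemma pvD2_countP (seq : String) (P : List Char) (i : Int) :
    pvD2 seq P i
      = ((List.range P.length).countP
          (fun (t : Nat) => decide (PySem.Str.pyGet? seq (i + (t : Int)) ≠ P[t]?)) : Int) := by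
  induction P generalizing i with
  | nil => simp [pvD2]
  | cons c P ih =>
    simp only [pvD2]
    rw [ih (i+1)]
    have key : ∀ t : Nat, (decide (PySem.Str.pyGet? seq ((i+1) + (t : Int)) ≠ P[t]?))
        = ((fun (t : Nat) => decide (PySem.Str.pyGet? seq (i + (t : Int)) ≠ (c :: P)[t]?)) ∘ (fun t => t + 1)) t := by
      intro t
      have harg : i + 1 + (t : Int) = i + ((t : Int) + 1) := by ring
      simp only [Function.comp, harg]
      push_cast
      simp
    rw [funext key]
    have hsucc : Nat.succ = (fun t : Nat => t + 1) := rfl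
    simp only [List.length_cons, List.range_succ_eq_map, List.countP_cons, List.countP_map,
      hsucc, Nat.cast_zero, add_zero, List.getElem?_cons_zero, decide_eq_true_eq]
    push_cast
    ring

lemma pvHamming_countP (p1 p2 : String) :
    hammingDistance p1 p2
      = ((List.range p1.toList.length).countP
          (fun (t : Nat) => decide (p1.toList[t]? ≠ p2.toList[t]?)) : Int) := by
  unfold hammingDistance
  rw [PySem.Str.len_eq, PySem.List.pyRange_zero_nat, List.foldl_map]
  rw [PySem.List.foldl_ite_add_one (fun (t : Nat) => PySem.Str.pyGet? p1 (t : Int) ≠ PySem.Str.pyGet? p2 (t : Int))]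
  simp

lemma pvWindow (seq pattern : String) (i : Nat)
    (_hle : i + pattern.toList.length ≤ seq.toList.length) :
    hammingDistance pattern
        (PySem.Str.slice seq (some (i : Int)) (some ((i : Int) + PySem.Str.len pattern)))
      = pvD2 seq pattern.toList (i : Int) := by
  rw [pvHamming_countP, pvD2_countP]
  congr 1
  apply List.countP_congr
  intro t ht
  have htk : t < pattern.toList.length := List.mem_range.mp ht
  have hslice : (PySem.Str.slice seq (some (i : Int)) (some ((i : Int) + PySem.Str.len pattern))).toList
      = (seq.toList.drop i).take pattern.toList.length := by
    simp [PySem.Str.len_eq, PySem.List.slice_natCast_add]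
  have hget : (PySem.Str.slice seq (some (i : Int)) (some ((i : Int) + PySem.Str.len pattern))).toList[t]?
      = seq.toList[i + t]? := by
    rw [hslice, List.getElem?_take_of_lt htk, List.getElem?_drop]
  have hseq : PySem.Str.pyGet? seq ((i : Int) + (t : Int)) = seq.toList[i + t]? := by
    rw [show (i : Int) + (t : Int) = ((i + t : Nat) : Int) by push_cast; ring, PySem.Str.pyGet?_natCast]
  simp only [hget, hseq, decide_eq_true_eq]
  constructor <;> exact fun h => Ne.symm h

lemma pvMStep_some (l : List Int) (a : Int) :
    l.foldl pvMStep (some a) = some (l.foldl min a) := by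
  induction l generalizing a with
  | nil => rfl
  | cons x t ih =>
    simp only [List.foldl_cons, pvMStep]
    have h : (if x < a then some x else some a) = some (min a x) := by
      split_ifs with h <;> simp [min_def] <;> omega
    rw [h, ih]

lemma pvSeqEq (seq pattern : String) (hle : pattern.toList.length ≤ seq.toList.length) :
    ((PySem.List.pyRange 0 (PySem.Str.len seq - PySem.Str.len pattern + 1) 1).foldl
        (fun ld i =>
          pvMStep ld (hammingDistance pattern
            (PySem.Str.slice seq (some i) (some (i + PySem.Str.len pattern))))) none).getD 0
    = ((PySem.List.min?
        ((PySem.List.enumerate pattern.toList).foldl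
          (fun mis jc =>
            (PySem.List.enumerate mis).map (fun im =>
              im.2 + (if PySem.Str.pyGet? seq (im.1 + jc.1) ≠ some jc.2 then 1 else 0)))
          (PySem.List.pyRepeat [0] (PySem.Str.len seq - PySem.Str.len pattern + 1)))
        (fun x => x)).getD 0) := by
  have hn : PySem.Str.len seq - PySem.Str.len pattern + 1
      = ((seq.toList.length - pattern.toList.length + 1 : Nat) : Int) := by
    simp only [PySem.Str.len_eq]
    omega
  have hB : ((PySem.List.enumerate pattern.toList).foldl
          (fun mis jc =>
            (PySem.List.enumerate mis).map (fun im =>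
              im.2 + (if PySem.Str.pyGet? seq (im.1 + jc.1) ≠ some jc.2 then 1 else 0)))
          (PySem.List.pyRepeat [0] (PySem.Str.len seq - PySem.Str.len pattern + 1)))
      = (List.range (seq.toList.length - pattern.toList.length + 1)).map
          (fun (i : Nat) => pvD2 seq pattern.toList (i : Int)) := by
    rw [hn, PySem.List.pyRepeat_singleton, Int.toNat_natCast]
    have hrep : List.replicate (seq.toList.length - pattern.toList.length + 1) (0 : Int)
        = (List.range (seq.toList.length - pattern.toList.length + 1)).map (fun _ => (0 : Int)) := by
      simp [List.map_const']
    rw [hrep, pvBFold seq pattern.toList 0 _ (fun _ => 0)]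
    apply List.map_congr_left
    intro i _
    simp
  have hA : (PySem.List.pyRange 0 (PySem.Str.len seq - PySem.Str.len pattern + 1) 1).foldl
        (fun ld i =>
          pvMStep ld (hammingDistance pattern
            (PySem.Str.slice seq (some i) (some (i + PySem.Str.len pattern))))) none
      = ((List.range (seq.toList.length - pattern.toList.length + 1)).map
          (fun (i : Nat) => pvD2 seq pattern.toList (i : Int))).foldl pvMStep none := by
    rw [hn, PySem.List.pyRange_zero_nat, List.foldl_map, List.foldl_map]
    apply PySem.List.foldl_congr_mem
    intro acc i hi
    have him := List.mem_range.mp hi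
    rw [pvWindow seq pattern i (by omega)]
  rw [hA, hB, List.range_succ_eq_map, List.map_cons, List.foldl_cons]
  rw [show pvMStep none (pvD2 seq pattern.toList ((0 : Nat) : Int))
        = some (pvD2 seq pattern.toList ((0 : Nat) : Int)) from rfl]
  rw [pvMStep_some, PySem.List.min?_id_cons]

-- ===== VERDICT (by name: the statement is the Claim_ definition above) =====
theorem patternToDnaDistance_spec : Claim_equal_patternToDnaDistance := by
  intro dna pattern _ hpre
  unfold Spec_patternToDnaDistance patternToDnaDistance patternToDnaDistance_alt
  refine PySem.List.foldl_congr_mem _ _ _ _ ?_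
  intro acc s hs
  have hle : pattern.toList.length ≤ s.toList.length := by
    have := hpre s hs
    simpa [PySem.Str.len_eq] using this
  have := pvSeqEq s pattern hle
  simp only [pvMStep] at this
  exact congrArg (acc + ·) this
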